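-- pv_equiv track=rewrite | github.com/igoryash-kudryash/camera-scale | camera-plan/my_utils.py | find_crucial_box
-- ===== SOURCE A (Python) =====
-- def find_crucial_box(boxes_coordinates, method='area'):
--     max_param = float('-inf')
--     crucial_box_index = 0
--     if len(boxes_coordinates) == 0:  # если было обнаружено лишь одно лицо
--         return 0
--
--     for box_num, coordinates in enumerate(boxes_coordinates):
--         top, left, bottom, right = coordinates
--         width = abs(left - right)
--         height = abs(top - bottom)
--
--         if method == "area":
--             area = height * width
--             if area > max_param:
--                 max_param = area
--                 crucial_box_index = box_num
--
--         if method == "height":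
--             if height > max_param:
--                 max_param = height
--                 crucial_box_index = box_num
--
--         if method == "width":
--             if width > max_param:
--                 max_param = width
--                 crucial_box_index = box_num
--
--     return crucial_box_index
-- ===== SOURCE B (Python) =====
-- def find_crucial_box(boxes_coordinates, method='area'):
--     if len(boxes_coordinates) == 0:
--         return 0
--     metrics = []
--     for top, left, bottom, right in boxes_coordinates:
--         width = abs(left - right)
--         height = abs(top - bottom)
--         if method == "area":
--             metrics.append(height * width)
--         elif method == "height":
--             metrics.append(height)
--         elif method == "width":
--             metrics.append(width)
--         else:
--             metrics.append(0)
--     return metrics.index(max(metrics))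
-- ===== Notes on version B (the rewrite author's own statement) =====
-- stated objective: simpler
-- what changed: Replaces the interleaved running-max-and-index loop over an enumerate with a two-pass shape: build the per-box metric list (0 for unknown methods), then return metrics.index(max(metrics)).
import Mathlib
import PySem

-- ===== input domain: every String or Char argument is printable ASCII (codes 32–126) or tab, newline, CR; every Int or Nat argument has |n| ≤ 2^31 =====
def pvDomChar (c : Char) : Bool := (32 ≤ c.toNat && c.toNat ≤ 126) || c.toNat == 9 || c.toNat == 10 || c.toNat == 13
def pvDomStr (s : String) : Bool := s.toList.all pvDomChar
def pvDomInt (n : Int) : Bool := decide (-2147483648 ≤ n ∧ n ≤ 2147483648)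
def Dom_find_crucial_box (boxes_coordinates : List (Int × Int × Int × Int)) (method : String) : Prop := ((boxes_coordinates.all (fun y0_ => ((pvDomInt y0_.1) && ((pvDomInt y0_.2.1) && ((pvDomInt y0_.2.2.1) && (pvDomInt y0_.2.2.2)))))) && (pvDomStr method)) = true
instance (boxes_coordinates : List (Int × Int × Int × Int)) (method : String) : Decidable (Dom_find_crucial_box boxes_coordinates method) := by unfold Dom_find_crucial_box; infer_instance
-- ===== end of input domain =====

-- B replaces A's interleaved running-max-and-index loop with a two-pass shape (build the metric list, then index of its max); objective: simpler.
-- ===== PORT A =====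
-- running-max step: max_param is Option Int (none = float('-inf'))
def stepA (p : Nat) (v : Int) (s : Option Int × Nat) : Option Int × Nat :=
  match s with
  | (none, _) => (some v, p)
  | (some c, i) => if c < v then (some v, p) else (some c, i)

-- the for-loop over enumerate(boxes_coordinates) with its three sequential ifs
def loopA (method : String) : List (Int × Int × Int × Int) → Nat → Option Int × Nat → Nat
  | [], _, s => s.2
  | (top, left, bottom, right) :: rest, p, s =>
    let width := |left - right|
    let height := |top - bottom|
    let s1 := if method = "area" then stepA p (height * width) s else s
    let s2 := if method = "height" then stepA p height s1 else s1
    let s3 := if method = "width" then stepA p width s2 else s2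
    loopA method rest (p + 1) s3

def find_crucial_box (boxes_coordinates : List (Int × Int × Int × Int)) (method : String) : Int :=
  if boxes_coordinates.length = 0 then 0
  else (loopA method boxes_coordinates 0 (none, 0) : Int)

-- ===== PORT B =====
-- per-box metric (0 for an unrecognised method), as in Source B's single building pass
def metricB (method : String) (box : Int × Int × Int × Int) : Int :=
  let width := |box.2.1 - box.2.2.2|
  let height := |box.1 - box.2.2.1|
  if method = "area" then height * width
  else if method = "height" then height
  else if method = "width" then width
  else 0

def find_crucial_box_alt (boxes_coordinates : List (Int × Int × Int × Int)) (method : String) : Int :=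
  if boxes_coordinates.length = 0 then 0
  else
    let metrics := boxes_coordinates.map (metricB method)
    match PySem.List.max? metrics (fun y => y) with
    | none => 0        -- unreachable: metrics is nonempty
    | some mx =>
      match PySem.List.index? metrics mx with
      | none => 0      -- unreachable: mx ∈ metrics
      | some i => (i : Int)

-- ===== PRECONDITION & SPEC =====
def Spec_find_crucial_box (boxes_coordinates : List (Int × Int × Int × Int)) (method : String) (out : Int) : Prop := out = find_crucial_box_alt boxes_coordinates method
instance (boxes_coordinates : List (Int × Int × Int × Int)) (method : String) (out : Int) : Decidable (Spec_find_crucial_box boxes_coordinates method out) := by unfold Spec_find_crucial_box; infer_instance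

-- ===== CLAIM (what is proved, stated in full; the proofs are below) =====
def Claim_equal_find_crucial_box : Prop := ∀ (boxes_coordinates : List (Int × Int × Int × Int)) (method : String), Dom_find_crucial_box boxes_coordinates method → Spec_find_crucial_box boxes_coordinates method (find_crucial_box boxes_coordinates method)

-- ===== LEMMAS AND PROOFS =====

-- first index of the maximum of x :: xs
def fm : Int → List Int → Nat
  | _, [] => 0
  | x, y :: ys => if ys.foldl max y ≤ x then 0 else fm y ys + 1

-- A's loop specialised to the list of metrics
def go : List Int → Nat → Option Int × Nat → Nat
  | [], _, s => s.2
  | m :: ms, p, s => go ms (p + 1) (stepA p m s)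

def goSpec : List Int → Nat → Int → Nat → Nat
  | [], _, _, i => i
  | x :: xs, p, c, i => if c < xs.foldl max x then p + fm x xs else i

lemma foldl_max_comm (ys : List Int) : ∀ a b : Int, ys.foldl max (max a b) = max a (ys.foldl max b) := by
  induction ys with
  | nil => intro a b; simp
  | cons z zs ih =>
    intro a b
    simp only [List.foldl_cons, max_assoc]
    exact ih a (max b z)

lemma go_some : ∀ (ms : List Int) (p : Nat) (c : Int) (i : Nat),
    go ms p (some c, i) = goSpec ms p c i := by
  intro ms
  induction ms with
  | nil => intro p c i; rfl
  | cons x xs ih =>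
    intro p c i
    simp only [go, stepA, goSpec]
    by_cases hx : c < x
    · rw [if_pos hx, ih]
      cases xs with
      | nil => simp [goSpec, fm, hx]
      | cons y ys =>
        have hfold : (y :: ys).foldl max x = max x (ys.foldl max y) := by
          simp only [List.foldl_cons]
          simpa using foldl_max_comm ys x y
        have hlt : c < (y :: ys).foldl max x := by rw [hfold]; exact lt_of_lt_of_le hx (le_max_left _ _)
        simp only [goSpec, fm]
        rw [if_pos hlt]
        by_cases hmx : ys.foldl max y ≤ x
        · rw [if_pos hmx, if_neg (not_lt.mpr hmx)]
          omega
        · rw [if_neg hmx, if_pos (not_le.mp hmx)]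
          omega
    · rw [if_neg hx, ih]
      cases xs with
      | nil =>
        simp only [goSpec]
        rw [if_neg (by simpa using hx)]
      | cons y ys =>
        simp only [goSpec, fm]
        have hfold : (y :: ys).foldl max x = max x (ys.foldl max y) := by
          simp only [List.foldl_cons]
          simpa using foldl_max_comm ys x y
        by_cases hN : c < ys.foldl max y
        · rw [if_pos hN, hfold, if_pos (by omega), if_neg (by omega)]
          omega
        · rw [if_neg hN, hfold, if_neg (by omega)]

lemma go_start (x : Int) (xs : List Int) : go (x :: xs) 0 (none, 0) = fm x xs := by
  simp only [go, stepA, go_some]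
  cases xs with
  | nil => rfl
  | cons y ys =>
    simp only [goSpec, fm]
    by_cases h : ys.foldl max y ≤ x
    · rw [if_neg (by omega), if_pos h]
    · rw [if_pos (by omega), if_neg h]
      omega

lemma index?_max : ∀ (x : Int) (xs : List Int),
    PySem.List.index? (x :: xs) (xs.foldl max x) = some (fm x xs) := by
  intro x xs
  induction xs generalizing x with
  | nil => simp [fm]
  | cons y ys ih =>
    have hfold : (y :: ys).foldl max x = max x (ys.foldl max y) := by
      simp only [List.foldl_cons]
      simpa using foldl_max_comm ys x y
    by_cases h : ys.foldl max y ≤ x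
    · have hx : (y :: ys).foldl max x = x := by rw [hfold]; omega
      rw [hx]
      simpa [fm, h] using PySem.List.index?_cons_self x (y :: ys)
    · have hx : (y :: ys).foldl max x = ys.foldl max y := by rw [hfold]; omega
      rw [hx, PySem.List.index?_cons_of_ne (h := show x ≠ ys.foldl max y by omega), ih y]
      simp [fm, h]

-- known-method cases: A's loop computes go over the metric list
lemma loopA_metric (method : String)
    (hm : method = "area" ∨ method = "height" ∨ method = "width") :
    ∀ (bs : List (Int × Int × Int × Int)) (p : Nat) (s : Option Int × Nat),
    loopA method bs p s = go (bs.map (metricB method)) p s := by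
  intro bs
  induction bs with
  | nil => intro p s; rfl
  | cons b rest ih =>
    intro p s
    obtain ⟨t, l, bo, r⟩ := b
    rcases hm with h | h | h <;> subst h <;>
      simp [loopA, go, metricB, ih]

lemma loopA_unknown (method : String)
    (h1 : method ≠ "area") (h2 : method ≠ "height") (h3 : method ≠ "width") :
    ∀ (bs : List (Int × Int × Int × Int)) (p : Nat) (s : Option Int × Nat),
    loopA method bs p s = s.2 := by
  intro bs
  induction bs with
  | nil => intro p s; rfl
  | cons b rest ih =>
    intro p s
    obtain ⟨t, l, bo, r⟩ := b
    simp [loopA, h1, h2, h3, ih]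

lemma foldl_max_zeros {α : Type} (l : List α) :
    (l.map (fun _ => (0 : Int))).foldl max 0 = 0 := by
  induction l with
  | nil => rfl
  | cons x xs ih => simpa using ih

-- B's value on a nonempty metric list is the first index of the maximum
lemma alt_eq_fm (b : Int × Int × Int × Int) (bs : List (Int × Int × Int × Int)) (method : String) :
    find_crucial_box_alt (b :: bs) method
      = (fm (metricB method b) (bs.map (metricB method)) : Int) := by
  simp only [find_crucial_box_alt, List.length_cons, List.map_cons]
  rw [if_neg (by omega)]
  simp only [PySem.List.max?_id_cons, index?_max]

-- ===== VERDICT (by name: the statement is the Claim_ definition above) =====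
theorem find_crucial_box_spec : Claim_equal_find_crucial_box := by
  intro boxes method _
  unfold Spec_find_crucial_box
  cases boxes with
  | nil => rfl
  | cons b bs =>
    rw [alt_eq_fm]
    by_cases h1 : method = "area"
    · simp only [find_crucial_box, List.length_cons, if_neg (by omega : ¬ (bs.length + 1 = 0)),
        loopA_metric method (Or.inl h1), List.map_cons, go_start]
    · by_cases h2 : method = "height"
      · simp only [find_crucial_box, List.length_cons, if_neg (by omega : ¬ (bs.length + 1 = 0)),
          loopA_metric method (Or.inr (Or.inl h2)), List.map_cons, go_start]
      · by_cases h3 : method = "width"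
        · simp only [find_crucial_box, List.length_cons, if_neg (by omega : ¬ (bs.length + 1 = 0)),
            loopA_metric method (Or.inr (Or.inr h3)), List.map_cons, go_start]
        · -- unrecognised method: A returns the initial index 0; B's metrics are all 0
          simp only [find_crucial_box, List.length_cons, if_neg (by omega : ¬ (bs.length + 1 = 0)),
            loopA_unknown method h1 h2 h3]
          have : metricB method b = 0 := by simp [metricB, h1, h2, h3]
          rw [this]
          have hmap : bs.map (metricB method) = bs.map (fun _ => (0 : Int)) := by
            apply List.map_congr_left; intro x _; simp [metricB, h1, h2, h3]
          rw [hmap]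
          cases bs with
          | nil => rfl
          | cons c cs =>
            simp only [fm, List.map_cons]
            rw [if_pos (by simpa using (foldl_max_zeros cs).le)]
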